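-- pv_equiv track=rewrite | github.com/muuli2022/WHCombat | combatfunctions.py | findHitLocation
-- ===== SOURCE A (Python) =====
-- def findHitLocation(hit : int):
--
--     hitlocations = [15, 35, 55, 80, 90, 100]
--     hitlocationnames = ["Head", "Right Arm", "Left Arm", "Body", "Left Leg", "Right Leg"]
--
--     temp = str(hit)
--
--     if len(temp) == 2:
--         hitlocation = int(temp[1] + temp[0])
--     else:
--         hitlocation = int(temp + "0")
--
--     i = 0
--
--     while True:
--
--         if hitlocation <= hitlocations[i]:
--             return hitlocationnames[i]
--         else:
--             i += 1
-- ===== SOURCE B (Python) =====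
-- def findHitLocation(hit : int):
--     # same value as A's string transform, computed arithmetically:
--     # reversed digits for two-digit numbers, otherwise append a zero
--     v = hit % 10 * 10 + hit // 10 if 10 <= hit <= 99 else hit * 10
--     # hardcoded binary decision tree over the bucket boundaries: no tables, no loop
--     if v <= 55:
--         return "Head" if v <= 15 else ("Right Arm" if v <= 35 else "Left Arm")
--     return "Body" if v <= 80 else ("Left Leg" if v <= 90 else "Right Leg")
-- ===== Notes on version B (the rewrite author's own statement) =====
-- stated objective: simpler
-- what changed: B drops A's string round-trip (str, character swap, int) in favour of digit arithmetic, and replaces A's unbounded while-loop scan over two parallel lists by a hardcoded binary decision tree over the bucket boundaries, with no tables at all.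
-- outside the precondition, e.g. on findHitLocation(-9): A raises ValueError, B returns 'Head'; on findHitLocation(-1): A raises ValueError, B returns 'Head'; on findHitLocation(100): A raises IndexError, B returns 'Right Leg'
import Mathlib
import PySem

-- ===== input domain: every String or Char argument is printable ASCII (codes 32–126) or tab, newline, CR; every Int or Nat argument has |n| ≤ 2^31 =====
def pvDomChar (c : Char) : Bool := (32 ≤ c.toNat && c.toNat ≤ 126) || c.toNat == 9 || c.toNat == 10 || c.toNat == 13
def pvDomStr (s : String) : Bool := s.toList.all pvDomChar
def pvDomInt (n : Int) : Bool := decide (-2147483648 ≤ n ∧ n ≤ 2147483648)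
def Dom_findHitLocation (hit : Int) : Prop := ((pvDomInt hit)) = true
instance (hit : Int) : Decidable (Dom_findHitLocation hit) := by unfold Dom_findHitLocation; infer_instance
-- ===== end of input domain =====

-- B replaces A's string-reversal transform by digit arithmetic and A's table-driven
-- while-loop scan by a hardcoded binary decision tree (objective: simpler).

-- ===== PORT A =====
-- the 'while True' first-match scan over the two parallel lists; "" stands for the
-- IndexError Python raises when the index runs past the list (excluded by Pre_)
def pyLocScan : List Int → List String → Int → String
  | t :: ts, n :: ns, loc => if loc ≤ t then n else pyLocScan ts ns loc
  | _, _, _ => ""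

def findHitLocation (hit : Int) : String :=
  let hitlocations : List Int := [15, 35, 55, 80, 90, 100]
  let hitlocationnames : List String :=
    ["Head", "Right Arm", "Left Arm", "Body", "Left Leg", "Right Leg"]
  let temp : List Char := PySem.Int.toChars hit
  let hitlocation : Int :=
    if temp.length == 2 then
      -- int(temp[1] + temp[0]); .getD covers the ValueError path, excluded by Pre_
      (PySem.Int.ofChars? [(PySem.List.pyGet? temp 1).getD ' ',
                           (PySem.List.pyGet? temp 0).getD ' ']).getD 0
    else
      -- int(temp + "0")
      (PySem.Int.ofChars? (temp ++ ['0'])).getD 0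
  pyLocScan hitlocations hitlocationnames hitlocation

-- ===== PORT B =====
def findHitLocation_alt (hit : Int) : String :=
  let v : Int :=
    if 10 ≤ hit ∧ hit ≤ 99 then PySem.Int.mod hit 10 * 10 + PySem.Int.floordiv hit 10
    else hit * 10
  if v ≤ 55 then
    if v ≤ 15 then "Head" else if v ≤ 35 then "Right Arm" else "Left Arm"
  else
    if v ≤ 80 then "Body" else if v ≤ 90 then "Left Leg" else "Right Leg"

-- ===== PRECONDITION & SPEC =====
-- Pre_ excludes exactly the inputs on which A raises: -9 ≤ hit ≤ -1 (ValueError in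
-- int(temp[1]+temp[0])) and hit ≥ 100 (the while loop runs past the list: IndexError).
def Pre_findHitLocation (hit : Int) : Prop := hit ≤ -10 ∨ (0 ≤ hit ∧ hit ≤ 99)
instance (hit : Int) : Decidable (Pre_findHitLocation hit) := by unfold Pre_findHitLocation; infer_instance
def pvWitness_findHitLocation : Int := 42

def Spec_findHitLocation (hit : Int) (out : String) : Prop := out = findHitLocation_alt hit
instance (hit : Int) (out : String) : Decidable (Spec_findHitLocation hit out) := by unfold Spec_findHitLocation; infer_instance

-- ===== CLAIM (what is proved, stated in full; the proofs are below) =====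
def Claim_equal_findHitLocation : Prop := ∀ (hit : Int), Dom_findHitLocation hit → Pre_findHitLocation hit → Spec_findHitLocation hit (findHitLocation hit)

-- ===== LEMMAS AND PROOFS =====

-- toDigitsCore with positive fuel grows the accumulator
lemma toDigitsCore_len_lt (b : Nat) : ∀ (f n : Nat) (l : List Char), 0 < f →
    l.length < (Nat.toDigitsCore b f n l).length := by
  intro f
  induction f with
  | zero => intro n l h; omega
  | succ f ih =>
    intro n l _
    simp only [Nat.toDigitsCore]
    split
    · simp
    · have := Nat.toDigitsCore_lens_eq b f (n / b) (Nat.digitChar (n % b)) l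
      rcases Nat.eq_zero_or_pos f with hf | hf
      · subst hf; simp [Nat.toDigitsCore]
      · have h2 := ih (n / b) (Nat.digitChar (n % b) :: l) hf
        simp at h2; omega

-- a two-or-more-digit number prints with at least two characters
lemma toDigits_len_ge_two (m : Nat) (h : 10 ≤ m) : 2 ≤ (Nat.toDigits 10 m).length := by
  unfold Nat.toDigits
  have hm1 : 0 < m + 1 := by omega
  simp only [Nat.toDigitsCore]
  split
  · next hdiv => rw [Nat.div_eq_zero_iff] at hdiv; omega
  · have := toDigitsCore_len_lt 10 m (m / 10) [Nat.digitChar (m % 10)] (by omega : 0 < m)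
    simp at this; omega

-- a '-'-headed, non-space-terminated string never parses to a positive int
lemma ofChars?_neg_last (t : List Char) (c : Char) (v : Int)
    (hc : PySem.Int.isIntSpace c = false)
    (h : PySem.Int.ofChars? ('-' :: (t ++ [c])) = some v) : v ≤ 0 := by
  have h1 : PySem.Int.isIntSpace '-' = false := by decide
  unfold PySem.Int.ofChars? at h
  simp [h1, hc, Option.bind_eq_some_iff] at h
  obtain ⟨a, _, rfl⟩ := h
  omega

-- A returns "Head" on every hit ≤ -10 (str(hit) is '-'-headed, ≥ 3 chars)
lemma findHitLocation_of_neg (hit : Int) (hneg : hit ≤ -10) : findHitLocation hit = "Head" := by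
  unfold findHitLocation
  dsimp only
  have hlt : hit < 0 := by omega
  have htemp : PySem.Int.toChars hit = '-' :: Nat.toDigits 10 hit.natAbs := by
    simp [PySem.Int.toChars, hlt]
  rw [htemp]
  have hlen2 : 2 ≤ (Nat.toDigits 10 hit.natAbs).length :=
    toDigits_len_ge_two hit.natAbs (by omega)
  rw [if_neg (by simp; omega)]
  have hsplit : ('-' :: Nat.toDigits 10 hit.natAbs) ++ ['0']
      = '-' :: (Nat.toDigits 10 hit.natAbs ++ ['0']) := rfl
  rw [hsplit]
  rcases hv : PySem.Int.ofChars? ('-' :: (Nat.toDigits 10 hit.natAbs ++ ['0'])) with _ | v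
  · simp [pyLocScan]
  · have hle := ofChars?_neg_last (Nat.toDigits 10 hit.natAbs) '0' v (by decide) hv
    simp only [Option.getD_some]
    simp only [pyLocScan]
    rw [if_pos (by omega)]

-- B returns "Head" on every hit ≤ -10 (the transformed value 10*hit is ≤ -100)
lemma findHitLocation_alt_of_neg (hit : Int) (h : hit ≤ -10) :
    findHitLocation_alt hit = "Head" := by
  unfold findHitLocation_alt
  dsimp only
  simp only [eq_false (show ¬(10 ≤ hit ∧ hit ≤ 99) by omega), if_false]
  rw [if_pos (by omega : hit * 10 ≤ 55), if_pos (by omega : hit * 10 ≤ 15)]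

set_option maxHeartbeats 1000000 in
theorem findHitLocation_spec : Claim_equal_findHitLocation := by
  intro hit _ hpre
  unfold Spec_findHitLocation
  rcases hpre with hneg | ⟨h1, h2⟩
  · rw [findHitLocation_of_neg hit hneg, findHitLocation_alt_of_neg hit hneg]
  · interval_cases hit <;> decide
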